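-- pv_equiv track=rewrite | github.com/harryhazza77/aws-safe-mcp | src/aws_safe_mcp/tools/stepfunctions.py | _permission_summary
-- ===== SOURCE A (Python) =====
-- from typing import Any
--
-- def _permission_summary(checks: list[dict[str, Any]]) -> dict[str, Any]:
--     allowed = sum(1 for check in checks if check.get("allowed") is True)
--     denied = sum(1 for check in checks if check.get("allowed") is False)
--     unknown = sum(1 for check in checks if check.get("allowed") is None)
--     explicit_denies = sum(1 for check in checks if check.get("explicit_deny") is True)
--     return {
--         "allowed": allowed,
--         "denied": denied,
--         "unknown": unknown,
--         "explicit_denies": explicit_denies,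
--     }
-- ===== SOURCE B (Python) =====
-- def _permission_summary(checks):
--     allowed = denied = unknown = explicit_denies = 0
--     for check in checks:
--         val = check.get("allowed")
--         if val is True:
--             allowed += 1
--         elif val is False:
--             denied += 1
--         elif val is None:
--             unknown += 1
--         if check.get("explicit_deny") is True:
--             explicit_denies += 1
--     return {
--         "allowed": allowed,
--         "denied": denied,
--         "unknown": unknown,
--         "explicit_denies": explicit_denies,
--     }
-- ===== Notes on version B (the rewrite author's own statement) =====
-- stated objective: simpler
-- what changed: Replaces four separate counting comprehensions (four passes over checks) with a single loop maintaining four integer accumulators.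
import Mathlib
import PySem

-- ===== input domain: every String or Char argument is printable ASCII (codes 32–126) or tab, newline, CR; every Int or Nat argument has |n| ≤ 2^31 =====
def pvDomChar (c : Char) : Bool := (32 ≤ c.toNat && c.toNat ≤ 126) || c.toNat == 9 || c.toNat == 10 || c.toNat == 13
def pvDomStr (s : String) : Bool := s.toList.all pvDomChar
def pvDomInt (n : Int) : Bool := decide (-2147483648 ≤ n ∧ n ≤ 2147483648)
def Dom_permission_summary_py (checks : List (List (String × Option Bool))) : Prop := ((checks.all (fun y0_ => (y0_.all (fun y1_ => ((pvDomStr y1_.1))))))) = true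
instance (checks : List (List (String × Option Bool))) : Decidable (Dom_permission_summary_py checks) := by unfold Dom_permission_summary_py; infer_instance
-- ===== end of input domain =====

-- B replaces A's four counting passes over `checks` by one loop with four accumulators (objective: simpler).

-- ===== PORT A =====
-- four generator-sum passes, each counted as a filter length
def permission_summary_py (checks : List (List (String × Option Bool))) : List (String × Int) :=
  let allowed : Int := ((checks.filter (fun check => (PySem.Dict.mk check).getD "allowed" none == some true)).length : Int)
  let denied : Int := ((checks.filter (fun check => (PySem.Dict.mk check).getD "allowed" none == some false)).length : Int)
  let unknown : Int := ((checks.filter (fun check => (PySem.Dict.mk check).getD "allowed" none == (none : Option Bool))).length : Int)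
  let explicit_denies : Int := ((checks.filter (fun check => (PySem.Dict.mk check).getD "explicit_deny" none == some true)).length : Int)
  [("allowed", allowed), ("denied", denied), ("unknown", unknown), ("explicit_denies", explicit_denies)]

-- ===== PORT B =====
-- one fold over checks carrying (allowed, denied, unknown, explicit_denies)
def permission_summary_py_alt (checks : List (List (String × Option Bool))) : List (String × Int) :=
  let r := checks.foldl (fun (acc : Int × Int × Int × Int) check =>
    let (a, d, u, e) := acc
    let val := (PySem.Dict.mk check).getD "allowed" none
    let (a, d, u) :=
      if val = some true then (a + 1, d, u)
      else if val = some false then (a, d + 1, u)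
      else (a, d, u + 1)
    let e := if (PySem.Dict.mk check).getD "explicit_deny" none = some true then e + 1 else e
    (a, d, u, e)) (0, 0, 0, 0)
  [("allowed", r.1), ("denied", r.2.1), ("unknown", r.2.2.1), ("explicit_denies", r.2.2.2)]

-- ===== PRECONDITION & SPEC =====
def Spec_permission_summary_py (checks : List (List (String × Option Bool))) (out : List (String × Int)) : Prop := out = permission_summary_py_alt checks
instance (checks : List (List (String × Option Bool))) (out : List (String × Int)) : Decidable (Spec_permission_summary_py checks out) := by unfold Spec_permission_summary_py; infer_instance

-- ===== CLAIM (what is proved, stated in full; the proofs are below) =====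
def Claim_equal_permission_summary_py : Prop := ∀ (checks : List (List (String × Option Bool))), Dom_permission_summary_py checks → Spec_permission_summary_py checks (permission_summary_py checks)

-- ===== LEMMAS AND PROOFS =====
def pvStep (acc : Int × Int × Int × Int) (check : List (String × Option Bool)) : Int × Int × Int × Int :=
  let (a, d, u, e) := acc
  let val := (PySem.Dict.mk check).getD "allowed" none
  let (a, d, u) :=
    if val = some true then (a + 1, d, u)
    else if val = some false then (a, d + 1, u)
    else (a, d, u + 1)
  let e := if (PySem.Dict.mk check).getD "explicit_deny" none = some true then e + 1 else e
  (a, d, u, e)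

theorem pvFold_eq (l : List (List (String × Option Bool))) (a d u e : Int) :
    l.foldl pvStep (a, d, u, e) =
      (a + ((l.filter (fun c => (PySem.Dict.mk c).getD "allowed" none == some true)).length : Int),
       d + ((l.filter (fun c => (PySem.Dict.mk c).getD "allowed" none == some false)).length : Int),
       u + ((l.filter (fun c => (PySem.Dict.mk c).getD "allowed" none == (none : Option Bool))).length : Int),
       e + ((l.filter (fun c => (PySem.Dict.mk c).getD "explicit_deny" none == some true)).length : Int)) := by
  induction l generalizing a d u e with
  | nil => simp
  | cons h t ih =>
    simp only [List.foldl_cons, List.filter_cons]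
    rcases hv : (PySem.Dict.mk h).getD "allowed" none with _ | b
    · simp [pvStep, hv, ih]
      split_ifs <;> constructor <;> ring_nf <;> simp [add_comm, add_assoc]
    · cases b <;> simp [pvStep, hv, ih] <;> split_ifs <;>
        constructor <;> ring_nf <;> simp [add_comm, add_assoc]

-- ===== VERDICT (by name: the statement is the Claim_ definition above) =====
theorem permission_summary_py_spec : Claim_equal_permission_summary_py := by
  intro checks _
  unfold Spec_permission_summary_py permission_summary_py permission_summary_py_alt
  show _ = [_,_,_,_]
  have h : checks.foldl (fun (acc : Int × Int × Int × Int) check =>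
      let (a, d, u, e) := acc
      let val := (PySem.Dict.mk check).getD "allowed" none
      let (a, d, u) :=
        if val = some true then (a + 1, d, u)
        else if val = some false then (a, d + 1, u)
        else (a, d, u + 1)
      let e := if (PySem.Dict.mk check).getD "explicit_deny" none = some true then e + 1 else e
      (a, d, u, e)) (0, 0, 0, 0) = checks.foldl pvStep (0, 0, 0, 0) := rfl
  simp only [h, pvFold_eq]
  simp
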